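-- pv_equiv track=rewrite | github.com/zhuyuezx/CSE291A_Project | textworld/heuristics_copy2/20260311_144702/textworld_opt_expansion_heuristic_step_001.py | _action_category
-- ===== SOURCE A (Python) =====
-- def _is_noop(action: str) -> bool:
--     """Return True for actions that only provide information and never change position."""
--     low = action.lower()
--     return any(noop in low for noop in ("look", "inventory", "task"))
--
-- def _action_category(action: str) -> str:
--     """
--     Very simple categorical split based on substrings.
--     Returns one of: move, open, close, take, read, noop, other
--     """
--     low = action.lower()
--     if any(dir_ in low for dir_ in ("north", "south", "east", "west", "go ", "move ")):
--         return "move"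
--     if "open" in low:
--         return "open"
--     if "close" in low:
--         return "close"
--     if "take" in low:
--         return "take"
--     if "read" in low:
--         return "read"
--     if _is_noop(action):
--         return "noop"
--     return "other"
-- ===== SOURCE B (Python) =====
-- # One pass over the string: at each position, record which categories have a
-- # keyword starting there (via a keyword->category map), then resolve by priority.
-- _KEYWORDS = (
--     ("north", "move"), ("south", "move"), ("east", "move"), ("west", "move"),
--     ("go ", "move"), ("move ", "move"),
--     ("open", "open"), ("close", "close"), ("take", "take"), ("read", "read"),
--     ("look", "noop"), ("inventory", "noop"), ("task", "noop"),
-- )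
-- _PRIORITY = ("move", "open", "close", "take", "read", "noop")
--
-- def _action_category(action: str) -> str:
--     low = action.lower()
--     hits = set()
--     for i in range(len(low)):
--         for kw, cat in _KEYWORDS:
--             if low.startswith(kw, i):
--                 hits.add(cat)
--     for cat in _PRIORITY:
--         if cat in hits:
--             return cat
--     return "other"
-- ===== Notes on version B (the rewrite author's own statement) =====
-- stated objective: alternative
-- what changed: Instead of testing each hardcoded keyword group as a whole-string substring membership per keyword, B makes a single positional sweep over the lowercased string collecting, via a keyword-to-category map, the set of categories whose keyword starts at some position, and then resolves that set against a priority list.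
import Mathlib
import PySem

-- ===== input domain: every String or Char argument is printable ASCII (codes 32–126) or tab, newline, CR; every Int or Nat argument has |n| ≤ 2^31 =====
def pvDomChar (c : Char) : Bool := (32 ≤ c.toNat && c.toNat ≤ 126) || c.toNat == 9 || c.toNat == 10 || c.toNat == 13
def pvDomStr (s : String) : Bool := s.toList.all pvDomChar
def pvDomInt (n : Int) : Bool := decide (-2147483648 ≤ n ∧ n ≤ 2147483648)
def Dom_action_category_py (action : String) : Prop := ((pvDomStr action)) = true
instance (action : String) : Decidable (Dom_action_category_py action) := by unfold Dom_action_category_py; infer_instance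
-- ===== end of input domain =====

-- B replaces A's hardcoded if-chain of per-keyword substring tests (plus the
-- _is_noop helper) with one positional sweep collecting the set of matched
-- categories via a keyword->category map, resolved against a priority list.

-- ===== PORT A =====
-- helper _is_noop: any(noop in low for noop in ("look","inventory","task"))
def is_noop_py (action : String) : Bool :=
  let low := PySem.Str.lower action
  PySem.Str.isIn "look" low || PySem.Str.isIn "inventory" low || PySem.Str.isIn "task" low

def action_category_py (action : String) : String :=
  let low := PySem.Str.lower action
  if PySem.Str.isIn "north" low || PySem.Str.isIn "south" low || PySem.Str.isIn "east" low ||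
     PySem.Str.isIn "west" low || PySem.Str.isIn "go " low || PySem.Str.isIn "move " low then
    "move"
  else if PySem.Str.isIn "open" low then "open"
  else if PySem.Str.isIn "close" low then "close"
  else if PySem.Str.isIn "take" low then "take"
  else if PySem.Str.isIn "read" low then "read"
  else if is_noop_py action then "noop"
  else "other"

-- ===== PORT B =====
def pvKeywords : List (String × String) :=
  [("north", "move"), ("south", "move"), ("east", "move"), ("west", "move"),
   ("go ", "move"), ("move ", "move"),
   ("open", "open"), ("close", "close"), ("take", "take"), ("read", "read"),
   ("look", "noop"), ("inventory", "noop"), ("task", "noop")]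

def pvPriority : List String := ["move", "open", "close", "take", "read", "noop"]

-- low.startswith(kw, i) for 0 ≤ i: exact as prefix test on the suffix at i
def pvStartsAt (low : List Char) (kw : String) (i : Nat) : Bool :=
  kw.toList.isPrefixOf (low.drop i)

-- the two nested loops building `hits`
def pvHits (low : List Char) : PySem.Set String :=
  (List.range low.length).foldl
    (fun hits i =>
      pvKeywords.foldl
        (fun h p => if pvStartsAt low p.1 i then PySem.Set.add h p.2 else h) hits)
    PySem.Set.empty

-- the final priority loop: first category found in hits, else "other"
def pvPick (hits : PySem.Set String) : List String → String
  | [] => "other"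
  | c :: rest => if PySem.Set.contains hits c then c else pvPick hits rest

def action_category_py_alt (action : String) : String :=
  let low := (PySem.Str.lower action).toList
  pvPick (pvHits low) pvPriority

-- ===== PRECONDITION & SPEC =====
def Spec_action_category_py (action : String) (out : String) : Prop := out = action_category_py_alt action
instance (action : String) (out : String) : Decidable (Spec_action_category_py action out) := by unfold Spec_action_category_py; infer_instance

-- ===== CLAIM (what is proved, stated in full; the proofs are below) =====
def Claim_equal_action_category_py : Prop := ∀ (action : String), Dom_action_category_py action → Spec_action_category_py action (action_category_py action)

-- ===== LEMMAS AND PROOFS =====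

-- membership after the inner keyword loop
theorem pv_mem_inner (low : List Char) (i : Nat) (l : List (String × String))
    (hits : PySem.Set String) (cat : String) :
    cat ∈ l.foldl (fun h p => if pvStartsAt low p.1 i then PySem.Set.add h p.2 else h) hits ↔
      cat ∈ hits ∨ ∃ p ∈ l, pvStartsAt low p.1 i = true ∧ p.2 = cat := by
  induction l generalizing hits with
  | nil => simp
  | cons p rest ih =>
      simp only [List.foldl_cons, ih]
      by_cases h : pvStartsAt low p.1 i = true <;>
        simp [h, PySem.Set.mem_add]
      all_goals tauto

-- membership after the outer position loop
theorem pv_mem_outer (low : List Char) (l : List Nat)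
    (hits : PySem.Set String) (cat : String) :
    cat ∈ l.foldl
        (fun hits i =>
          pvKeywords.foldl
            (fun h p => if pvStartsAt low p.1 i then PySem.Set.add h p.2 else h) hits) hits ↔
      cat ∈ hits ∨ ∃ i ∈ l, ∃ p ∈ pvKeywords, pvStartsAt low p.1 i = true ∧ p.2 = cat := by
  induction l generalizing hits with
  | nil => simp
  | cons j rest ih =>
      simp only [List.foldl_cons, ih, pv_mem_inner, List.exists_mem_cons_iff]
      exact or_assoc

-- a nonempty keyword starts at some position < length iff it is a substring
theorem pv_exists_startsAt (low : List Char) (kw : String) (hkw : kw.toList ≠ []) :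
    (∃ i ∈ List.range low.length, pvStartsAt low kw i = true) ↔
      PySem.Chars.isIn kw.toList low = true := by
  rw [← PySem.Chars.exists_prefix_drop_iff_isIn]
  constructor
  · rintro ⟨i, _, hi⟩
    exact ⟨i, List.isPrefixOf_iff_prefix.mp hi⟩
  · rintro ⟨j, hj⟩
    by_cases hlt : j < low.length
    · exact ⟨j, List.mem_range.mpr hlt, List.isPrefixOf_iff_prefix.mpr hj⟩
    · exfalso
      have : low.drop j = [] := List.drop_eq_nil_of_le (le_of_not_gt hlt)
      rw [this] at hj
      exact hkw (List.prefix_nil.mp hj)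

-- characterization of the hit set
theorem pv_mem_hits (low : List Char) (cat : String) :
    cat ∈ pvHits low ↔
      ∃ p ∈ pvKeywords, p.2 = cat ∧ PySem.Chars.isIn p.1.toList low = true := by
  unfold pvHits
  rw [pv_mem_outer]
  simp only [PySem.Set.empty, List.not_mem_nil, false_or]
  constructor
  · rintro ⟨i, hi, p, hp, hs, hc⟩
    refine ⟨p, hp, hc, ?_⟩
    have hne : p.1.toList ≠ [] := by
      fin_cases hp <;> simp
    exact (pv_exists_startsAt low p.1 hne).mp ⟨i, hi, hs⟩
  · rintro ⟨p, hp, hc, hin⟩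
    have hne : p.1.toList ≠ [] := by
      fin_cases hp <;> simp
    obtain ⟨i, hi, hs⟩ := (pv_exists_startsAt low p.1 hne).mpr hin
    exact ⟨i, hi, p, hp, hs, hc⟩

theorem pv_contains_hits (low : List Char) (cat : String) :
    PySem.Set.contains (pvHits low) cat =
      pvKeywords.any (fun p => decide (p.2 = cat) && PySem.Chars.isIn p.1.toList low) := by
  by_cases h : cat ∈ pvHits low
  · have := (pv_mem_hits low cat).mp h
    obtain ⟨p, hp, hc, hin⟩ := this
    rw [(PySem.Set.contains_iff _ _).mpr h]
    symm
    rw [List.any_eq_true]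
    exact ⟨p, hp, by simp [hc, hin]⟩
  · have h2 : PySem.Set.contains (pvHits low) cat = false := by
      rw [← Bool.not_eq_true]
      intro hc; exact h ((PySem.Set.contains_iff _ _).mp hc)
    rw [h2]
    symm
    rw [← Bool.not_eq_true, List.any_eq_true]
    rintro ⟨p, hp, hpc⟩
    simp only [Bool.and_eq_true, decide_eq_true_eq] at hpc
    exact h ((pv_mem_hits low cat).mpr ⟨p, hp, hpc.1, hpc.2⟩)

-- ===== VERDICT (by name: the statement is the Claim_ definition above) =====
theorem action_category_py_spec : Claim_equal_action_category_py := by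
  intro action _
  unfold Spec_action_category_py action_category_py action_category_py_alt is_noop_py
  simp only [pvPriority, pvPick, pv_contains_hits, pvKeywords,
    List.any_cons, List.any_nil, PySem.Str.isIn_eq, PySem.Str.toList_lower]
  simp only [String.reduceEq, decide_true, decide_false, Bool.true_and, Bool.false_and,
    Bool.or_false, Bool.false_or, Bool.or_assoc]
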